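-- pv_equiv track=rewrite | github.com/7ashosh/IFT1015 | ExeNote7/convDate.py | nbJour
-- ===== SOURCE A (Python) =====
-- def nbJour(jour):
--     tab=[] #creation un tableau vide
--     if type(jour) == int: #si le type de jour est un int
--         if jour <=31 and jour > 0 : #si jour entre 0 et 31
--             for i in range (1,(jour)+1): #pour i dans l'intervalle (1,jour+1)
--                 if i < 10: #si i est plus petit que 10
--                     tab.append('0'+str(i)) #ajouter a la fin de tab'0'et str i
--                 else: #sinon
--                     tab.append(str(i)) #ajouter a la fin de tab le string de i
--             return tab[jour-1]
--         else: #sinon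
--             return ''
--     else: #sinon
--         return ''
-- ===== SOURCE B (Python) =====
-- def nbJour(jour):
--     if type(jour) == int and 0 < jour <= 31:
--         return '0' + str(jour) if jour < 10 else str(jour)
--     return ''
-- ===== Notes on version B (the rewrite author's own statement) =====
-- stated objective: simpler
-- what changed: Replaces building the whole list of padded day strings in a loop and indexing it with a direct closed-form padding of the single requested day.
import Mathlib
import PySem

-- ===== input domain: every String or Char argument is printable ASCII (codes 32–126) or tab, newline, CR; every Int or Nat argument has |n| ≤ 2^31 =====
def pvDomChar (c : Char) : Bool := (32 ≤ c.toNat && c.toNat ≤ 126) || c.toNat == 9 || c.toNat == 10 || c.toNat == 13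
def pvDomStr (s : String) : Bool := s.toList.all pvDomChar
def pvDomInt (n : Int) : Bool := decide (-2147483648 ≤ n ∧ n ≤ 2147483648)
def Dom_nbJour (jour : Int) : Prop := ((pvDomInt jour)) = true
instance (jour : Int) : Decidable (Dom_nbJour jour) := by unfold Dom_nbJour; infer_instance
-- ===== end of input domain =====

-- B drops A's list-building loop and pads the single requested day directly (simpler).
-- ===== PORT A =====
-- jour : Int, so Python's 'type(jour) == int' is always true under the type convention.
def nbJour (jour : Int) : String :=
  if jour ≤ 31 ∧ jour > 0 then
    let tab := (PySem.List.pyRange 1 (jour + 1) 1).foldl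
      (fun tab i =>
        tab ++ [if i < 10 then "0" ++ PySem.Int.toStr i else PySem.Int.toStr i]) []
    -- tab[jour-1]: the index is always in range here, so Python never raises
    (PySem.List.pyGet? tab (jour - 1)).getD ""
  else ""

-- ===== PORT B =====
def nbJour_alt (jour : Int) : String :=
  if 0 < jour ∧ jour ≤ 31 then
    if jour < 10 then "0" ++ PySem.Int.toStr jour else PySem.Int.toStr jour
  else ""

-- ===== PRECONDITION & SPEC =====
def Spec_nbJour (jour : Int) (out : String) : Prop := out = nbJour_alt jour
instance (jour : Int) (out : String) : Decidable (Spec_nbJour jour out) := by unfold Spec_nbJour; infer_instance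

-- ===== CLAIM (what is proved, stated in full; the proofs are below) =====
def Claim_equal_nbJour : Prop := ∀ (jour : Int), Dom_nbJour jour → Spec_nbJour jour (nbJour jour)

-- ===== LEMMAS AND PROOFS =====

-- ===== VERDICT (by name: the statement is the Claim_ definition above) =====
theorem nbJour_spec : Claim_equal_nbJour := by
  intro jour _
  unfold Spec_nbJour
  by_cases h : 0 < jour ∧ jour ≤ 31
  · obtain ⟨n, rfl⟩ : ∃ n : ℕ, jour = (n:ℤ) := ⟨jour.toNat, (Int.toNat_of_nonneg h.1.le).symm⟩
    have hn : 1 ≤ n := by exact_mod_cast h.1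
    simp only [nbJour, nbJour_alt, if_pos h, if_pos (⟨h.2, h.1⟩ : (n:ℤ) ≤ 31 ∧ (n:ℤ) > 0)]
    rw [PySem.List.foldl_append_singleton_eq_map, List.nil_append]
    rw [PySem.List.pyRange_of_pos 1 ((n:ℤ)+1) one_pos]
    have hcount : (if (1:ℤ) < (n:ℤ)+1 then ((((n:ℤ)+1) - 1 + 1 - 1)/1).toNat else 0) = n := by
      rw [if_pos (by omega)]; simp
    rw [hcount, List.map_map]
    have hidx : (n:ℤ) - 1 = ((n-1 : ℕ) : ℤ) := by omega
    rw [hidx, PySem.List.pyGet?_natCast, List.getElem?_map, List.getElem?_range (by omega)]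
    simp only [Option.map_some, Option.getD_some, Function.comp]
    have h1 : (1:ℤ) + 1 * ((n-1:ℕ):ℤ) = (n:ℤ) := by omega
    rw [h1]
  · simp only [nbJour, nbJour_alt]
    rw [if_neg (by omega), if_neg (by omega)]
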